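-- pv_equiv track=rewrite | github.com/MayerAgusto/cryto | main.py | insert_mani
-- ===== SOURCE A (Python) =====
-- def insert_mani(texto):
--   cadenas = []
--   i = 0
--   while i < len(texto):
--     cadenas.append(texto[i:i+20])
--     i += 20
--   cadenas=[i+"MANI" if len(i) == 20 else i for i in cadenas]
--   poema = "".join(cadenas)
--
--   if len(poema) % 4 != 0:
--     for j in range(4 - (len(poema) % 4)):
--       poema += "M"
--   return poema
-- ===== SOURCE B (Python) =====
-- def insert_mani(texto):
--     parts = []
--     cnt = 0
--     for ch in texto:
--         parts.append(ch)
--         cnt += 1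
--         if cnt == 20:
--             parts.append("MANI")
--             cnt = 0
--     poema = "".join(parts)
--     return poema + "M" * ((-len(poema)) % 4)
-- ===== Notes on version B (the rewrite author's own statement) =====
-- stated objective: alternative
-- what changed: Fuses A's three phases (build a chunk list with slicing, a comprehension tagging full chunks with 'MANI', and a padding loop) into one character-level pass with a running counter, and replaces the padding loop by the closed form (-len) % 4.
import Mathlib
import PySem

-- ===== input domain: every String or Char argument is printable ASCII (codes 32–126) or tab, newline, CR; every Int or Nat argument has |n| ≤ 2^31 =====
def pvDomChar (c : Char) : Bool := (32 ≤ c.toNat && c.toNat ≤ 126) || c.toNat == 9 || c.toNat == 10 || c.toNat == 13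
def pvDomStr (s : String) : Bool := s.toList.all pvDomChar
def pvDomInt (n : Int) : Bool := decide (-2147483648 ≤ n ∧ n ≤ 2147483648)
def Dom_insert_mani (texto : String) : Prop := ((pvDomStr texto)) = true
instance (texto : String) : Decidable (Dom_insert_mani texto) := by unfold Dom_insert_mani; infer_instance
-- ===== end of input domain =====

-- B fuses A's three phases (chunk list, tagging comprehension, padding loop) into one
-- character pass with a running counter and a closed-form pad count (alternative decomposition).

-- ===== PORT A =====
-- while i < len(texto): cadenas.append(texto[i:i+20]); i += 20
def insertManiChunks (s : List Char) (i : Nat) : List (List Char) :=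
  if i < s.length then
    PySem.List.slice s (some (i : Int)) (some ((i : Int) + 20)) :: insertManiChunks s (i + 20)
  else []
termination_by s.length - i

def insert_mani (texto : String) : String :=
  let cadenas := insertManiChunks texto.toList 0
  let cadenas := cadenas.map (fun c => if c.length = 20 then c ++ ['M','A','N','I'] else c)
  let poema := cadenas.flatten
  let poema :=
    if poema.length % 4 ≠ 0 then
      (PySem.List.pyRange 0 ((4 : Int) - ((poema.length % 4 : Nat) : Int)) 1).foldl
        (fun acc _ => acc ++ ['M']) poema
    else poema
  String.ofList poema

-- ===== PORT B =====
-- one step of B's loop body: append the char, bump the counter, emit "MANI" at 20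
def insertManiStep (p : List Char × Nat) (ch : Char) : List Char × Nat :=
  let parts := p.1 ++ [ch]
  let cnt := p.2 + 1
  if cnt = 20 then (parts ++ ['M','A','N','I'], 0) else (parts, cnt)

def insert_mani_alt (texto : String) : String :=
  let p := texto.toList.foldl insertManiStep ([], 0)
  String.ofList (p.1 ++ List.replicate (PySem.Int.mod (-(p.1.length : Int)) 4).toNat 'M')

-- ===== PRECONDITION & SPEC =====
def Spec_insert_mani (texto : String) (out : String) : Prop := out = insert_mani_alt texto
instance (texto : String) (out : String) : Decidable (Spec_insert_mani texto out) := by unfold Spec_insert_mani; infer_instance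

-- ===== CLAIM (what is proved, stated in full; the proofs are below) =====
def Claim_equal_insert_mani : Prop := ∀ (texto : String), Dom_insert_mani texto → Spec_insert_mani texto (insert_mani texto)

-- ===== LEMMAS AND PROOFS =====

-- B's fold over fewer than (20 - c) remaining chars just appends them
theorem foldl_step_small (s : List Char) (acc : List Char) (c : Nat)
    (h : c + s.length < 20) :
    s.foldl insertManiStep (acc, c) = (acc ++ s, c + s.length) := by
  induction s generalizing acc c with
  | nil => simp
  | cons ch t ih =>
    simp only [List.foldl_cons, insertManiStep]
    have hne : ¬ (c + 1 = 20) := by simp at h; omega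
    rw [if_neg hne, ih (acc ++ [ch]) (c + 1) (by simp at h ⊢; omega)]
    simp; omega

-- B's fold over a run completing the counter emits "MANI" and resets
theorem foldl_step_fill (t : List Char) (acc : List Char) (c : Nat)
    (h : c + t.length = 20) (hc : c < 20) :
    t.foldl insertManiStep (acc, c) = (acc ++ t ++ ['M','A','N','I'], 0) := by
  induction t generalizing acc c with
  | nil => simp at h; omega
  | cons ch t' ih =>
    simp only [List.foldl_cons, insertManiStep]
    by_cases ht : t' = []
    · subst ht
      have : c + 1 = 20 := by simp at h; omega
      rw [if_pos this]; simp
    · have hne : ¬ (c + 1 = 20) := by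
        intro hx
        have : t'.length = 0 := by simp at h; omega
        exact ht (List.eq_nil_of_length_eq_zero this)
      rw [if_neg hne, ih (acc ++ [ch]) (c + 1) (by simp at h ⊢; omega) (by omega)]
      simp

-- core invariant: B's fold over the suffix from i equals A's tagged-chunk flatten from i
theorem fold_eq_chunks (n : Nat) : ∀ (s : List Char) (i : Nat) (acc : List Char),
    s.length - i ≤ n →
    ((s.drop i).foldl insertManiStep (acc, 0)).1
      = acc ++ ((insertManiChunks s i).map
          (fun c => if c.length = 20 then c ++ ['M','A','N','I'] else c)).flatten := by
  induction n with
  | zero =>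
    intro s i acc h
    have hd : s.drop i = [] := List.drop_eq_nil_of_le (by omega)
    rw [insertManiChunks, if_neg (by omega)]
    simp [hd]
  | succ n ih =>
    intro s i acc h
    by_cases hi : i < s.length
    · rw [insertManiChunks, if_pos hi]
      have hslice : PySem.List.slice s (some (i : Int)) (some ((i : Int) + 20))
          = (s.drop i).take 20 := by exact_mod_cast PySem.List.slice_natCast_add s i 20
      by_cases h20 : 20 ≤ s.length - i
      · -- a full chunk
        have hlen : ((s.drop i).take 20).length = 20 := by
          simp [List.length_take, List.length_drop]; omega
        have hsplit : s.drop i = (s.drop i).take 20 ++ (s.drop i).drop 20 := by simp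
        rw [hsplit, List.foldl_append,
          foldl_step_fill ((s.drop i).take 20) acc 0 (by rw [hlen]) (by omega)]
        rw [List.drop_drop]
        rw [ih s (i + 20) (acc ++ (s.drop i).take 20 ++ ['M','A','N','I']) (by omega)]
        simp [hslice, hlen]
      · -- a short final chunk
        have hlt : s.length - i < 20 := by omega
        have hdl : (s.drop i).length = s.length - i := by simp
        rw [foldl_step_small (s.drop i) acc 0 (by omega)]
        have htake : (s.drop i).take 20 = s.drop i := List.take_of_length_le (by omega)
        rw [insertManiChunks, if_neg (by omega)]
        have hne : (PySem.List.slice s (some (i : Int)) (some ((i : Int) + 20))).length ≠ 20 := by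
          rw [hslice, htake]; omega
        simp [hslice, htake]
        omega
    · rw [insertManiChunks, if_neg hi]
      have hd : s.drop i = [] := List.drop_eq_nil_of_le (by omega)
      simp [hd]

-- A's padding loop appends one 'M' per range element
theorem foldl_pad (l : List Int) (init : List Char) :
    l.foldl (fun acc _ => acc ++ ['M']) init = init ++ List.replicate l.length 'M' := by
  induction l generalizing init with
  | nil => simp
  | cons x t ih =>
    simp only [List.foldl_cons, ih, List.length_cons]
    simp [List.append_assoc, List.replicate_succ]

theorem pad_zero (L : Nat) (h : L % 4 = 0) : ((-(L : Int)) % 4).toNat = 0 := by omega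

-- ===== VERDICT (by name: the statement is the Claim_ definition above) =====
theorem insert_mani_spec : Claim_equal_insert_mani := by
  intro texto _
  unfold Spec_insert_mani
  simp only [insert_mani, insert_mani_alt]
  have hmain := fold_eq_chunks texto.toList.length texto.toList 0 [] (by omega)
  simp only [List.drop_zero, List.nil_append] at hmain
  rw [hmain]
  set P := ((insertManiChunks texto.toList 0).map
      (fun c => if c.length = 20 then c ++ ['M','A','N','I'] else c)).flatten with hP
  rw [PySem.Int.mod_eq_emod_of_pos (by norm_num : (0:Int) < 4)]
  by_cases h4 : P.length % 4 = 0
  · rw [if_neg (by omega), pad_zero _ h4]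
    simp
  · rw [if_pos (by omega), foldl_pad, PySem.List.length_pyRange_one]
    have hc : ((4 : Int) - ((P.length % 4 : Nat) : Int) - 0).toNat
        = ((-(P.length : Int)) % 4).toNat := by omega
    rw [hc]
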